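-- pv_equiv track=rewrite | github.com/Gonza-e/Aed- | Python/Malvado.py | malvado
-- ===== SOURCE A (Python) =====
-- def malvado(num,cont: int) -> bool:
--     if num == 0:
--         if (cont % 2) == 0:
--             return True
--         else:
--             return False
--     else:
--         if (num % 10) == 1:
--             return malvado(num // 10,cont + 1)
--         else:
--             return malvado(num // 10,cont)
-- ===== SOURCE B (Python) =====
-- def malvado(num, cont: int) -> bool:
--     digits = []
--     while num != 0:
--         digits.append(num % 10)
--         num //= 10
--     return (cont + digits.count(1)) % 2 == 0
-- ===== Notes on version B (the rewrite author's own statement) =====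
-- stated objective: alternative
-- what changed: Instead of threading a counter through recursive calls, B first materialises the decimal digit list in a loop, then uses list.count(1) and one final parity check.
import Mathlib
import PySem

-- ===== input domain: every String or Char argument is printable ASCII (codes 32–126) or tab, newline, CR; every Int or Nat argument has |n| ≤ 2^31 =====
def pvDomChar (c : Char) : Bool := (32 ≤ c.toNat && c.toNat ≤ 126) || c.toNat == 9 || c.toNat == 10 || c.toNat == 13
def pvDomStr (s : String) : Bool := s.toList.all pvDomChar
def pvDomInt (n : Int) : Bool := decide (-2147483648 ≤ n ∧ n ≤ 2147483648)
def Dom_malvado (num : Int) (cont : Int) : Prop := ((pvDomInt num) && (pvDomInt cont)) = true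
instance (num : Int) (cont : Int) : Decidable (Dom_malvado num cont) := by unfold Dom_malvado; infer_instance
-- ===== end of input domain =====

-- B builds the decimal digit list first and then counts 1s once, instead of A's accumulator-threading recursion; equal on all num ≥ 0.


-- ===== PORT A =====
-- A's recursion, with fuel making it total in Lean (fuel num.natAbs+1 never runs out when 0 ≤ num,
-- since num//10 strictly decreases towards 0; for num < 0 Python A raises RecursionError — excluded by Pre_).
def malvadoGo : Nat → Int → Int → Bool
  | 0, _, cont => decide (PySem.Int.mod cont 2 = 0)
  | fuel + 1, num, cont =>
    if num = 0 then
      decide (PySem.Int.mod cont 2 = 0)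
    else
      if PySem.Int.mod num 10 = 1 then
        malvadoGo fuel (PySem.Int.floordiv num 10) (cont + 1)
      else
        malvadoGo fuel (PySem.Int.floordiv num 10) cont

def malvado (num : Int) (cont : Int) : Bool :=
  malvadoGo (num.natAbs + 1) num cont

-- ===== PORT B =====
-- Stage 1 of B: the while-loop that appends num % 10 and divides, producing the digit list.
def malvadoDigits : Nat → Int → List Int
  | 0, _ => []
  | fuel + 1, num =>
    if num = 0 then []
    else PySem.Int.mod num 10 :: malvadoDigits fuel (PySem.Int.floordiv num 10)

-- Stage 2 of B: digits.count(1), then one parity check.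
def malvado_alt (num : Int) (cont : Int) : Bool :=
  decide (PySem.Int.mod (cont + ((malvadoDigits (num.natAbs + 1) num).count 1 : Int)) 2 = 0)

-- ===== PRECONDITION & SPEC =====
-- Pre_ excludes num < 0: there Python A recurses on num//10 = -1 forever and raises RecursionError
-- (and Python B's loop spins forever).
def Pre_malvado (num : Int) (cont : Int) : Prop := 0 ≤ num
instance (num : Int) (cont : Int) : Decidable (Pre_malvado num cont) := by unfold Pre_malvado; infer_instance
def pvWitness_malvado : Int × Int := (101, 1)

def Spec_malvado (num : Int) (cont : Int) (out : Bool) : Prop := out = malvado_alt num cont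
instance (num : Int) (cont : Int) (out : Bool) : Decidable (Spec_malvado num cont out) := by unfold Spec_malvado; infer_instance

-- ===== CLAIM =====
def Claim_equal_malvado : Prop := ∀ (num : Int) (cont : Int), Dom_malvado num cont → Pre_malvado num cont → Spec_malvado num cont (malvado num cont)

-- ===== LEMMAS AND PROOFS =====
-- With equal fuel, A's recursion computes exactly the parity of cont plus the number of 1-digits B collects.
lemma malvadoGo_eq_count (fuel : Nat) :
    ∀ (num cont : Int),
      malvadoGo fuel num cont
        = decide (PySem.Int.mod (cont + ((malvadoDigits fuel num).count 1 : Int)) 2 = 0) := by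
  induction fuel with
  | zero => intro num cont; simp [malvadoGo, malvadoDigits]
  | succ fuel ih =>
    intro num cont
    simp only [malvadoGo, malvadoDigits]
    split_ifs with h1 h2
    · simp
    · rw [ih]
      rw [PySem.Int.mod_eq_emod_of_pos (by norm_num)] at h2
      simp [h2]
      omega
    · rw [ih]
      rw [PySem.Int.mod_eq_emod_of_pos (by norm_num)] at h2
      simp [h2]

-- ===== VERDICT =====
theorem malvado_spec : Claim_equal_malvado := by
  intro num cont _ _
  unfold Spec_malvado malvado malvado_alt
  exact malvadoGo_eq_count (num.natAbs + 1) num cont
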